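-- pv_equiv track=rewrite | github.com/geosohh/AnimeTorr | animetorr/downloader/anime/common.py | terms_match
-- ===== SOURCE A (Python) =====
-- def terms_match(title,terms):
--     """
--     Check if all terms are present (or not, in case of '-term') in the search result.
--
--     :type title: str or unicode
--     :param title: Search result.
--
--     :type terms: list[str or unicode]
--     :param terms: List of search terms
--
--     :rtype: bool
--     :return: If the title matches the search terms or not.
--     """
--     success = True
--     title = title.lower()
--     for term in terms:
--         term = term.strip().lower()
--         if term.startswith('-'):
--             if term[1:] in title:
--                 success = False
--                 break
--         else:
--             if term not in title:
--                 success = False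
--                 break
--     return success
-- ===== SOURCE B (Python) =====
-- def terms_match(title, terms):
--     """Classify-then-verify re-implementation: split terms into inclusions and
--     exclusions in one pass, then check all inclusions and no exclusions."""
--     title = title.lower()
--     required = []
--     excluded = []
--     for term in terms:
--         term = term.strip().lower()
--         if term.startswith('-'):
--             excluded.append(term[1:])
--         else:
--             required.append(term)
--     return all(inc in title for inc in required) and not any(exc in title for exc in excluded)
-- ===== Notes on version B (the rewrite author's own statement) =====
-- stated objective: alternative
-- what changed: Replaces the interleaved break-loop with a classify pass (inclusions vs exclusions) followed by two separate all/any verification phases over the lowered title.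
import Mathlib
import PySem

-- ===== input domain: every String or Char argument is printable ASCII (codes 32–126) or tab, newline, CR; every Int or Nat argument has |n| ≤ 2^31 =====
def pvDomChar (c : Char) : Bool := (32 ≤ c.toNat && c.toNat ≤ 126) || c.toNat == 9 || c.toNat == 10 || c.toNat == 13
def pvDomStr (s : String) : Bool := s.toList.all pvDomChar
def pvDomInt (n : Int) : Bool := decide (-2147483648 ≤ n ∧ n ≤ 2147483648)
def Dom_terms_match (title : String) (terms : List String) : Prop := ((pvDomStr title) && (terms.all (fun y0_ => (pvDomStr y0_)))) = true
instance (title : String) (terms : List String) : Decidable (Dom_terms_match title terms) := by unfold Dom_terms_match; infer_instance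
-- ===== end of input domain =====

-- B replaces A's interleaved break-loop with a classify pass followed by two verification phases (alternative decomposition; return value only).

-- ===== PORT A =====
-- the for-loop with 'success = False; break': recursion over terms, early false on failure
def terms_match_loopA (t : String) : List String → Bool
  | [] => true
  | term :: rest =>
    let tm := PySem.Str.lower (PySem.Str.strip term)
    if PySem.Str.startswith tm "-" then
      if PySem.Str.isIn (PySem.Str.slice tm (some 1) none) t then false
      else terms_match_loopA t rest
    else
      if PySem.Str.isIn tm t then terms_match_loopA t rest
      else false

def terms_match (title : String) (terms : List String) : Bool :=
  terms_match_loopA (PySem.Str.lower title) terms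

-- ===== PORT B =====
-- classify pass: normalized terms split into (required, excluded) in order
def terms_match_classify : List String → List String × List String
  | [] => ([], [])
  | term :: rest =>
    let tm := PySem.Str.lower (PySem.Str.strip term)
    let p := terms_match_classify rest
    if PySem.Str.startswith tm "-" then (p.1, PySem.Str.slice tm (some 1) none :: p.2)
    else (tm :: p.1, p.2)

def terms_match_alt (title : String) (terms : List String) : Bool :=
  let t := PySem.Str.lower title
  let p := terms_match_classify terms
  p.1.all (fun inc => PySem.Str.isIn inc t) && !(p.2.any (fun exc => PySem.Str.isIn exc t))

-- ===== PRECONDITION & SPEC =====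
def Spec_terms_match (title : String) (terms : List String) (out : Bool) : Prop := out = terms_match_alt title terms
instance (title : String) (terms : List String) (out : Bool) : Decidable (Spec_terms_match title terms out) := by unfold Spec_terms_match; infer_instance

-- ===== CLAIM (what is proved, stated in full; the proofs are below) =====
def Claim_equal_terms_match : Prop := ∀ (title : String) (terms : List String), Dom_terms_match title terms → Spec_terms_match title terms (terms_match title terms)

-- ===== LEMMAS AND PROOFS =====
theorem loopA_eq_classify (t : String) (terms : List String) :
    terms_match_loopA t terms =
      ((terms_match_classify terms).1.all (fun inc => PySem.Str.isIn inc t) &&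
       !((terms_match_classify terms).2.any (fun exc => PySem.Str.isIn exc t))) := by
  induction terms with
  | nil => rfl
  | cons term rest ih =>
    simp only [terms_match_loopA, terms_match_classify]
    split_ifs with h1 h2 h2
    · simp only [List.any_cons, h2, Bool.true_or, Bool.not_true, Bool.and_false]
    · rw [Bool.not_eq_true] at h2
      simp only [List.any_cons, h2, Bool.false_or, ih]
    · simp only [List.all_cons, h2, Bool.true_and, ih]
    · rw [Bool.not_eq_true] at h2
      simp only [List.all_cons, h2, Bool.false_and]

-- ===== VERDICT (by name: the statement is the Claim_ definition above) =====
theorem terms_match_spec : Claim_equal_terms_match := by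
  intro title terms _
  unfold Spec_terms_match terms_match terms_match_alt
  exact loopA_eq_classify _ _
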